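-- pv_equiv track=rewrite | github.com/IBM/guardium-supported-datasources | consolidation-script2/Helpers/helpers.py | has_duplicates_2d_lst
-- ===== SOURCE A (Python) =====
-- from typing import List,Callable,Dict,Any
--
-- def has_duplicates_2d_lst(list_of_lists:List[List[str]]) -> bool:
--     """
--     Checks a 2D list for duplicate values, ignoring "null" and empty string values.
--
--     Args:
--         list_of_lists (List[List[str]]): A 2D list containing sublists of strings.
--
--     Returns:
--         bool: True if there are duplicate values (excluding "null" and ""), False otherwise.
--
--     Example:
--         lists_with_duplicates = [["apple", "banana", "cherry"], ["dog", "banana"], ["fish", ""]]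
--         result_with_duplicates = has_duplicates_2d_lst(lists_with_duplicates)
--         # result_with_duplicates will be True because "banana" is a duplicate
--
--         lists_with_duplicates = [['apple', 'apple'], ['banana']
--         result_with_duplicates = has_duplicates_2d_lst(lists_with_duplicates)
--         # result_with_duplicates will be True because "apple" is a duplicate
--
--         lists_without_duplicates =
--             [["apple", "banana", "cherry"], ["dog", "elephant"], ["fish", ""]]
--         result_without_duplicates = has_duplicates_2d_lst(lists_without_duplicates)
--         # result_without_duplicates will be False because there are no duplicates
--     """
--     seen = set()
--     for sublist in list_of_lists:
--         for item in sublist: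
--             if item in seen and (item != "null" and item != ""):
--                 return True
--             seen.add(item)
--     return False
-- ===== SOURCE B (Python) =====
-- def has_duplicates_2d_lst(list_of_lists):
--     filtered = [item for sublist in list_of_lists for item in sublist
--                 if item != "null" and item != ""]
--     return len(set(filtered)) != len(filtered)
-- ===== Notes on version B (the rewrite author's own statement) =====
-- stated objective: simpler
-- what changed: Replaces the streaming seen-set loop with early return by flatten-and-filter then a single size comparison len(set(filtered)) != len(filtered).
import Mathlib
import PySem

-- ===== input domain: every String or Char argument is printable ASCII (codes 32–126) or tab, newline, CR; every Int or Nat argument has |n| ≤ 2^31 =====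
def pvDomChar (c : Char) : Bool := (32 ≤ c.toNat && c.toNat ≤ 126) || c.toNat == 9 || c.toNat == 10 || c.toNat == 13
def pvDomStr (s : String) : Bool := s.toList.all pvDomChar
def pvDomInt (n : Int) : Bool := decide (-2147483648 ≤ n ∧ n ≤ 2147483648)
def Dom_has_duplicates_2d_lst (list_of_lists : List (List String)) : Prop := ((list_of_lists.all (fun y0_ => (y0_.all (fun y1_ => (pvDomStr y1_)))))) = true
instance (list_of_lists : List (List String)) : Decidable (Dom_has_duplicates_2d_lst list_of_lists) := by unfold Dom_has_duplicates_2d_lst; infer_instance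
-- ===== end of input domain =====

-- B: flatten-and-filter then one size comparison instead of A's streaming seen-set loop with early return (simpler decomposition, same cost).

-- ===== PORT A =====
-- inner 'for item in sublist' loop: none = 'return True' was hit, some seen = loop finished
def pvInnerA (sublist : List String) (seen : PySem.Set String) : Option (PySem.Set String) :=
  match sublist with
  | [] => some seen
  | item :: rest =>
    if item ∈ seen ∧ (item ≠ "null" ∧ item ≠ "") then none
    else pvInnerA rest (PySem.Set.add seen item)

-- outer 'for sublist in list_of_lists' loop
def pvOuterA (lol : List (List String)) (seen : PySem.Set String) : Bool :=
  match lol with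
  | [] => false
  | sub :: rest =>
    match pvInnerA sub seen with
    | none => true
    | some seen' => pvOuterA rest seen'

def has_duplicates_2d_lst (list_of_lists : List (List String)) : Bool :=
  pvOuterA list_of_lists PySem.Set.empty

-- ===== PORT B =====
def has_duplicates_2d_lst_alt (list_of_lists : List (List String)) : Bool :=
  let filtered := list_of_lists.flatten.filter (fun item => item ≠ "null" ∧ item ≠ "")
  decide ((PySem.Set.ofList filtered).length ≠ filtered.length)

-- ===== PRECONDITION & SPEC =====
def Spec_has_duplicates_2d_lst (list_of_lists : List (List String)) (out : Bool) : Prop := out = has_duplicates_2d_lst_alt list_of_lists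
instance (list_of_lists : List (List String)) (out : Bool) : Decidable (Spec_has_duplicates_2d_lst list_of_lists out) := by unfold Spec_has_duplicates_2d_lst; infer_instance

-- ===== CLAIM (what is proved, stated in full; the proofs are below) =====
def Claim_equal_has_duplicates_2d_lst : Prop := ∀ (list_of_lists : List (List String)), Dom_has_duplicates_2d_lst list_of_lists → Spec_has_duplicates_2d_lst list_of_lists (has_duplicates_2d_lst list_of_lists)

-- ===== LEMMAS AND PROOFS =====

-- ===== VERDICT (by name: the statement is the Claim_ definition above) =====
-- one-list version of A's nested loop, run over the flattened input (proof-only helper)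
def pvFlatLoop (xs : List String) (seen : PySem.Set String) : Bool :=
  match xs with
  | [] => false
  | x :: rest =>
    if x ∈ seen ∧ (x ≠ "null" ∧ x ≠ "") then true
    else pvFlatLoop rest (PySem.Set.add seen x)

theorem pvFlatLoop_append (sub ys : List String) (seen : PySem.Set String) :
    pvFlatLoop (sub ++ ys) seen =
      (match pvInnerA sub seen with
       | none => true
       | some s => pvFlatLoop ys s) := by
  induction sub generalizing seen with
  | nil => simp [pvInnerA]
  | cons x rest ih =>
      simp only [List.cons_append, pvFlatLoop, pvInnerA]
      split_ifs with h
      · rfl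
      · exact ih _

theorem pvOuter_eq_flat (lol : List (List String)) (seen : PySem.Set String) :
    pvOuterA lol seen = pvFlatLoop lol.flatten seen := by
  induction lol generalizing seen with
  | nil => simp [pvOuterA, pvFlatLoop]
  | cons sub rest ih =>
      simp only [pvOuterA, List.flatten_cons, pvFlatLoop_append]
      cases h : pvInnerA sub seen with
      | none => rfl
      | some s => exact ih s

theorem pvFlatLoop_iff (xs : List String) (seen : PySem.Set String) :
    pvFlatLoop xs seen = true ↔
      ¬ ((xs.filter (fun item => item ≠ "null" ∧ item ≠ "")).Nodup ∧
         ∀ y ∈ xs.filter (fun item => item ≠ "null" ∧ item ≠ ""), y ∉ seen) := by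
  induction xs generalizing seen with
  | nil => simp [pvFlatLoop, List.Nodup]
  | cons x rest ih =>
      simp only [pvFlatLoop]
      split_ifs with h
      · obtain ⟨hmem, hp⟩ := h
        simp only [true_iff]
        intro ⟨_, hall⟩
        exact hall x (by simp [List.mem_filter, hp]) hmem
      · rw [ih]
        apply not_congr
        by_cases hp : x ≠ "null" ∧ x ≠ ""
        · have hx : x ∉ seen := fun hm => h ⟨hm, hp⟩
          simp only [List.filter_cons, decide_eq_true_eq, if_pos hp, List.nodup_cons,
            List.mem_cons, List.mem_filter, PySem.Set.mem_add]
          constructor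
          · rintro ⟨hnd, hall⟩
            refine ⟨⟨fun hf => hall x hf (Or.inr rfl), hnd⟩, ?_⟩
            rintro y (rfl | hy)
            · exact hx
            · exact fun hin => hall y hy (Or.inl hin)
          · rintro ⟨⟨hnf, hnd⟩, hall⟩
            refine ⟨hnd, fun y hy hin => ?_⟩
            rcases hin with h1 | rfl
            · exact hall y (Or.inr hy) h1
            · exact hnf hy
        · have hfe : List.filter (fun item => decide (item ≠ "null" ∧ item ≠ "")) (x :: rest)
              = List.filter (fun item => decide (item ≠ "null" ∧ item ≠ "")) rest := by
            simp [hp]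
          rw [hfe]
          constructor
          · rintro ⟨hnd, hall⟩
            exact ⟨hnd, fun y hy hin =>
              hall y hy ((PySem.Set.mem_add seen x y).mpr (Or.inl hin))⟩
          · rintro ⟨hnd, hall⟩
            refine ⟨hnd, fun y hy hin => ?_⟩
            rcases (PySem.Set.mem_add seen x y).mp hin with h1 | rfl
            · exact hall y hy h1
            · exact hp (by simpa using (List.mem_filter.mp hy).2)

theorem pvLen_ofList_iff (xs : List String) :
    (PySem.Set.ofList xs).length = xs.length ↔ xs.Nodup := by
  constructor
  · intro h
    have hperm : (PySem.Set.ofList xs).Perm xs.dedup := by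
      rw [List.perm_ext_iff_of_nodup (PySem.Set.nodup_ofList xs) xs.nodup_dedup]
      intro y; rw [PySem.Set.mem_ofList, List.mem_dedup]
    have hl : xs.dedup.length = xs.length := by rw [← hperm.length_eq, h]
    have he := xs.dedup_sublist.eq_of_length hl
    rw [← he]; exact xs.nodup_dedup
  · intro h
    rw [PySem.Set.ofList_eq_self_of_nodup xs h]

-- ===== VERDICT (by name: the statement is the Claim_ definition above) =====
theorem has_duplicates_2d_lst_spec : Claim_equal_has_duplicates_2d_lst := by
  intro lol _
  unfold Spec_has_duplicates_2d_lst has_duplicates_2d_lst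
  simp only [has_duplicates_2d_lst_alt]
  rw [pvOuter_eq_flat, show (PySem.Set.empty : PySem.Set String) = [] from rfl]
  have hflat := pvFlatLoop_iff lol.flatten PySem.Set.empty
  simp only [PySem.Set.empty, List.not_mem_nil, not_false_iff, implies_true, and_true] at hflat
  have hlen := pvLen_ofList_iff (lol.flatten.filter (fun item => item ≠ "null" ∧ item ≠ ""))
  cases hb : pvFlatLoop lol.flatten [] with
  | false =>
      have hnd : (lol.flatten.filter (fun item => item ≠ "null" ∧ item ≠ "")).Nodup := by
        by_contra hc
        exact absurd (hflat.mpr hc) (by rw [hb]; simp)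
      rw [eq_comm, decide_eq_false_iff_not, ne_eq, not_not]
      exact hlen.mpr hnd
  | true =>
      rw [eq_comm, decide_eq_true_eq]
      intro hc
      exact (hflat.mp hb) (hlen.mp hc)
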